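-- pv_equiv track=rewrite | github.com/Joonkkyo/coding-test-practice | Programmers/부족한 금액 계산하기.py | solution
-- ===== SOURCE A (Python) =====
-- def solution(price, money, count):
--     answer = -1
--     sum = 0
--     for i in range(count):
--         sum += (i + 1) * price
--     answer = sum - money
--
--     if money - sum >= 0:
--         answer = 0
--
--     return answer
-- ===== SOURCE B (Python) =====
-- def solution(price, money, count):
--     n = count if count > 0 else 0
--     total = price * (n * (n + 1) // 2)
--     shortfall = total - money
--     return shortfall if shortfall > 0 else 0
-- ===== Notes on version B (the rewrite author's own statement) =====
-- stated objective: faster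
-- what changed: replaces the O(count) summation loop with the arithmetic-series closed form price*count*(count+1)/2 and a max-with-0
import Mathlib
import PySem

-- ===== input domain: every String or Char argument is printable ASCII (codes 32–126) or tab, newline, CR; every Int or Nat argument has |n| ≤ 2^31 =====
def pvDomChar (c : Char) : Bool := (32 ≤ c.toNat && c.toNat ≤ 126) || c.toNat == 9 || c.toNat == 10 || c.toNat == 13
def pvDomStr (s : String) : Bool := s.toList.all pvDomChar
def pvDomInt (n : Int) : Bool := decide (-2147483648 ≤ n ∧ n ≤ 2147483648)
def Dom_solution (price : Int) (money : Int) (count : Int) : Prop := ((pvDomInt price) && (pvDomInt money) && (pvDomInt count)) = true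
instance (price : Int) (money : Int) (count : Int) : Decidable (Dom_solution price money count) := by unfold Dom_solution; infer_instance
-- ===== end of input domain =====

-- B replaces A's O(count) summation loop by the O(1) arithmetic-series closed form.


-- ===== PORT A =====
-- literal transliteration: accumulate (i+1)*price over range(count), then branch
def solution (price : Int) (money : Int) (count : Int) : Int :=
  let sum := (PySem.List.pyRange 0 count 1).foldl (fun acc i => acc + (i + 1) * price) 0
  let answer := sum - money
  if money - sum ≥ 0 then 0 else answer

-- ===== PORT B =====
def solution_alt (price : Int) (money : Int) (count : Int) : Int :=
  let n := if count > 0 then count else 0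
  let total := price * PySem.Int.floordiv (n * (n + 1)) 2
  let shortfall := total - money
  if shortfall > 0 then shortfall else 0

-- ===== PRECONDITION & SPEC =====
def Spec_solution (price : Int) (money : Int) (count : Int) (out : Int) : Prop := out = solution_alt price money count
instance (price : Int) (money : Int) (count : Int) (out : Int) : Decidable (Spec_solution price money count out) := by unfold Spec_solution; infer_instance

-- ===== CLAIM (what is proved, stated in full; the proofs are below) =====
def Claim_equal_solution : Prop := ∀ (price : Int) (money : Int) (count : Int), Dom_solution price money count → Spec_solution price money count (solution price money count)

-- ===== LEMMAS AND PROOFS =====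

-- A's loop sum over range(n) (n : Nat) equals the closed form.
theorem pv_sum_closed (price : Int) (n : Nat) :
    (PySem.List.pyRange 0 n 1).foldl (fun acc i => acc + (i + 1) * price) 0
      = price * (n * (n + 1) / 2) := by
  induction n with
  | zero => simp [PySem.List.pyRange_one_eq_nil]
  | succ k ih =>
    have h : ((k : Int) + 1) = ((k + 1 : Nat) : Int) := by push_cast; ring
    rw [show ((k + 1 : Nat) : Int) = (k : Int) + 1 by push_cast; ring,
        PySem.List.pyRange_one_succ_right (by positivity), List.foldl_append, ih]
    simp only [List.foldl]
    obtain ⟨r, hr⟩ := Int.even_mul_succ_self (k : Int)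
    obtain ⟨s, hs⟩ := Int.even_mul_succ_self ((k : Int) + 1)
    have h2 : ((k : Int)) * (k + 1) / 2 = r := by omega
    have h3 : ((k : Int) + 1) * ((k : Int) + 1 + 1) / 2 = s := by omega
    have h4 : s = r + (k + 1) := by nlinarith [hr, hs]
    rw [h2, h3, h4]
    ring

-- ===== VERDICT (by name: the statement is the Claim_ definition above) =====
theorem solution_spec : Claim_equal_solution := by
  intro price money count _
  unfold Spec_solution solution solution_alt
  dsimp only
  rw [PySem.Int.floordiv_eq_ediv_of_pos (by omega : (0:Int) < 2)]
  by_cases hc : count > 0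
  · have hn : count = ((count.toNat : Nat) : Int) := by omega
    rw [if_pos hc, hn, pv_sum_closed]
    split_ifs <;> omega
  · rw [if_neg hc, PySem.List.pyRange_one_eq_nil (by omega)]
    simp only [List.foldl_nil]
    split_ifs <;> omega
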